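-- pv_equiv track=rewrite | github.com/hiteshpindikanti/fol_resolution_csci561 | resolution_iterative_v2.py | is_unifiable
-- ===== SOURCE A (Python) =====
-- from copy import deepcopy
--
-- def is_unifiable(arguments1: tuple, arguments2: tuple) -> tuple:
--
--     if len(arguments1) != len(arguments2):
--         return False, None
--
--     # Stack structure:
--     # 1. remaining_arguments1
--     # 2. remaining_arguments2
--     # 3. unifier
--     stack = [(list(arguments1), list(arguments2), {})]
--     while stack:
--         remaining_arguments1, remaining_arguments2, unifier = stack.pop(-1)
--         unifier_instances = []
--         if not remaining_arguments1 and not remaining_arguments2: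
--             return True, unifier
--         elif remaining_arguments1[0].islower() and remaining_arguments2[0].islower():
--             if remaining_arguments1[0] not in unifier.keys() and remaining_arguments1[0] not in unifier.values():
--                 unifier_copy = deepcopy(unifier)
--                 unifier_copy[remaining_arguments1[0]] = remaining_arguments2[0]
--                 unifier_instances.append(unifier_copy)
--
--             if remaining_arguments2[0] not in unifier.keys() and remaining_arguments2[0] not in unifier.values():
--                 unifier_copy = deepcopy(unifier)
--                 unifier_copy[remaining_arguments2[0]] = remaining_arguments1[0]
--                 unifier_instances.append(unifier_copy)
--
--         elif remaining_arguments1[0].islower() and not remaining_arguments2[0].islower():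
--             unifier_copy = deepcopy(unifier)
--             for key, value in unifier.items():
--                 if remaining_arguments1[0] == value:
--                     unifier_copy[key] = remaining_arguments2[0]
--             unifier_copy[remaining_arguments1[0]] = remaining_arguments2[0]
--             unifier_instances.append(unifier_copy)
--
--         elif not remaining_arguments1[0].islower() and remaining_arguments2[0].islower():
--             unifier_copy = deepcopy(unifier)
--             for key, value in unifier.items():
--                 if remaining_arguments2[0] == value:
--                     unifier_copy[key] = remaining_arguments1[0]
--             unifier_copy[remaining_arguments2[0]] = remaining_arguments1[0]
--             unifier_instances.append(unifier_copy)
--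
--         elif not remaining_arguments1[0].islower() and not remaining_arguments2[0].islower():
--             if remaining_arguments1[0] == remaining_arguments2[0]:
--                 unifier_copy = deepcopy(unifier)
--                 unifier_instances.append(unifier_copy)
--
--         # Append to stack
--         for unifier in unifier_instances:
--             # Substituting the change in the argument lists
--             new_remaining_arguments1 = list(
--                 map(lambda x: unifier[x] if x in unifier.keys() else x, remaining_arguments1))
--             new_remaining_arguments2 = list(
--                 map(lambda x: unifier[x] if x in unifier.keys() else x, remaining_arguments2))
--
--             # Appending to stack
--             stack.append((new_remaining_arguments1[1:], new_remaining_arguments2[1:], deepcopy(unifier)))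
--
--     return False, None
-- ===== SOURCE B (Python) =====
-- def is_unifiable(arguments1: tuple, arguments2: tuple) -> tuple:
--     if len(arguments1) != len(arguments2):
--         return False, None
--
--     def subst(u, xs):
--         return [u.get(x, x) for x in xs]
--
--     def try_unify(rem1, rem2, unifier):
--         if not rem1:
--             return unifier
--         a, b = rem1[0], rem2[0]
--         if a.islower() and b.islower():
--             # explore b -> a first (matches the original's LIFO order), then a -> b
--             if b not in unifier and b not in unifier.values():
--                 u = dict(unifier)
--                 u[b] = a
--                 r = try_unify(subst(u, rem1[1:]), subst(u, rem2[1:]), u)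
--                 if r is not None:
--                     return r
--             if a not in unifier and a not in unifier.values():
--                 u = dict(unifier)
--                 u[a] = b
--                 return try_unify(subst(u, rem1[1:]), subst(u, rem2[1:]), u)
--             return None
--         if a.islower():
--             u = {k: (b if v == a else v) for k, v in unifier.items()}
--             u[a] = b
--             return try_unify(subst(u, rem1[1:]), subst(u, rem2[1:]), u)
--         if b.islower():
--             u = {k: (a if v == b else v) for k, v in unifier.items()}
--             u[b] = a
--             return try_unify(subst(u, rem1[1:]), subst(u, rem2[1:]), u)
--         if a == b:
--             return try_unify(subst(unifier, rem1[1:]), subst(unifier, rem2[1:]), unifier)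
--         return None
--
--     r = try_unify(list(arguments1), list(arguments2), {})
--     return (True, r) if r is not None else (False, None)
-- ===== Notes on version B (the rewrite author's own statement) =====
-- stated objective: alternative
-- what changed: The explicit-stack DFS while-loop is replaced by a recursive backtracking helper that returns the unifier or None, recursing into the arg2->arg1 candidate before the arg1->arg2 one to reproduce the original LIFO exploration order, and the in-loop value-rewriting of the unifier copy becomes a dict comprehension.
import Mathlib
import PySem

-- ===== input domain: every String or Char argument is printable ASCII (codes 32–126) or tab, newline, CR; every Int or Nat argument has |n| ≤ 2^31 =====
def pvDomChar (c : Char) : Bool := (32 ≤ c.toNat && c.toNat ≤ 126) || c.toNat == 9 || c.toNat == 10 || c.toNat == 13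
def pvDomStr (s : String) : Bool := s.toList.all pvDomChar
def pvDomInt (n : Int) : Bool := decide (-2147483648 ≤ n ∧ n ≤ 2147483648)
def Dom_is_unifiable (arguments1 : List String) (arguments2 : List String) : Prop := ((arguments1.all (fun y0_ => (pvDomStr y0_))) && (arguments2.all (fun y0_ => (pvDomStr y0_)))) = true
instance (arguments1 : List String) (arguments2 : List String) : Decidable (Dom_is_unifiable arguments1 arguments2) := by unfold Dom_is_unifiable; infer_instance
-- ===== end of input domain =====

-- B replaces A's explicit-stack DFS loop by a recursive backtracking helper returning Option,
-- exploring the same candidate unifiers in the original LIFO order (objective: alternative decomposition).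

-- ===== PORT A =====

-- Python str.islower(); exact on the printable-ASCII domain (cased characters = letters there)
def pyIslower (s : String) : Bool :=
  s.toList.any PySem.Chars.islower && s.toList.all (fun c => !PySem.Chars.isupper c)

-- 'unifier[x] if x in unifier.keys() else x' mapped over a list (identical expression in both Pythons)
def pySubst (u : PySem.Dict String String) (xs : List String) : List String :=
  xs.map (fun x => (PySem.Dict.get? u x).getD x)

-- the list 'unifier_instances' A builds for the popped state, in Python's append order
def instsA (a b : String) (u : PySem.Dict String String) : List (PySem.Dict String String) :=
  if pyIslower a && pyIslower b then
    (if !(u.keys.contains a) && !(u.values.contains a) then [u.insert a b] else []) ++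
    (if !(u.keys.contains b) && !(u.values.contains b) then [u.insert b a] else [])
  else if pyIslower a && !(pyIslower b) then
    -- 'for key, value in unifier.items(): if arg1 == value: unifier_copy[key] = arg2' then 'unifier_copy[arg1] = arg2'
    [(u.items.foldl (fun d kv => if kv.2 == a then d.insert kv.1 b else d) u).insert a b]
  else if !(pyIslower a) && pyIslower b then
    [(u.items.foldl (fun d kv => if kv.2 == b then d.insert kv.1 a else d) u).insert b a]
  else
    if a == b then [u] else []

theorem instsA_length (a b : String) (u : PySem.Dict String String) : (instsA a b u).length ≤ 2 := by
  unfold instsA; split_ifs <;> simp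

def stackW (st : List (List String × List String × PySem.Dict String String)) : Nat :=
  (st.map (fun s => 3 ^ s.1.length)).sum

-- the while-stack loop; the Lean list's HEAD is the Python stack's TOP (pop(-1) / append at the end),
-- so the children pushed in order are explored in reverse order
def loopA : List (List String × List String × PySem.Dict String String) → Bool × Option (List (String × String))
  | [] => (false, none)
  | (r1, r2, u) :: rest =>
    if r1.isEmpty && r2.isEmpty then (true, some u.items)
    else
      match r1, r2 with
      | a :: t1, b :: t2 =>
        let children := (instsA a b u).map
          (fun u' => ((pySubst u' (a :: t1)).drop 1, (pySubst u' (b :: t2)).drop 1, u'))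
        loopA (children.reverse ++ rest)
      | _, _ => (false, none)   -- Python raises IndexError here; unreachable from is_unifiable (lengths stay equal)
  termination_by st => stackW st
  decreasing_by
    simp only [stackW, List.map_append, List.sum_append, List.map_reverse, List.sum_reverse,
      List.map_map]
    have h1 : ((instsA a b u).map
        ((fun s => 3 ^ s.1.length) ∘ (fun u' => ((pySubst u' (a :: t1)).drop 1, (pySubst u' (b :: t2)).drop 1, u')))).sum
        = (instsA a b u).length * 3 ^ t1.length := by
      rw [List.map_congr_left (g := fun _ => 3 ^ t1.length)]
      · simp [List.map_const', List.sum_replicate, smul_eq_mul]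
      · intro u' _
        simp [pySubst]
    rw [h1]
    have h2 := instsA_length a b u
    have h3 : 0 < 3 ^ t1.length := Nat.pow_pos (n := t1.length) (show 0 < 3 by norm_num)
    simp [pow_succ]
    nlinarith

def is_unifiable (arguments1 : List String) (arguments2 : List String) : Bool × (Option (List (String × String))) :=
  if arguments1.length ≠ arguments2.length then (false, none)
  else loopA [(arguments1, arguments2, PySem.Dict.empty)]

-- ===== PORT B =====

-- '{k: (new if v == old else v) for k, v in unifier.items()}'
def replaceValsB (u : PySem.Dict String String) (old new : String) : PySem.Dict String String :=
  PySem.Dict.mk (u.items.map (fun kv => if kv.2 == old then (kv.1, new) else kv))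

def tryUnify : List String → List String → PySem.Dict String String → Option (PySem.Dict String String)
  | [], _, u => some u
  | a :: r1, b :: r2, u =>
    if pyIslower a && pyIslower b then
      let first :=
        if !(u.contains b) && !(u.values.contains b) then
          let u' := u.insert b a
          tryUnify (pySubst u' r1) (pySubst u' r2) u'
        else none
      match first with
      | some r => some r
      | none =>
        if !(u.contains a) && !(u.values.contains a) then
          let u' := u.insert a b
          tryUnify (pySubst u' r1) (pySubst u' r2) u'
        else none
    else if pyIslower a then
      let u' := (replaceValsB u a b).insert a b
      tryUnify (pySubst u' r1) (pySubst u' r2) u'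
    else if pyIslower b then
      let u' := (replaceValsB u b a).insert b a
      tryUnify (pySubst u' r1) (pySubst u' r2) u'
    else if a == b then
      tryUnify (pySubst u r1) (pySubst u r2) u
    else none
  | _ :: _, [], _ => none  -- Python raises IndexError; unreachable after the length guard
  termination_by r1 _ _ => r1.length
  decreasing_by all_goals simp [pySubst]

def is_unifiable_alt (arguments1 : List String) (arguments2 : List String) : Bool × (Option (List (String × String))) :=
  if arguments1.length ≠ arguments2.length then (false, none)
  else
    match tryUnify arguments1 arguments2 PySem.Dict.empty with
    | some u => (true, some u.items)
    | none => (false, none)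

-- ===== PRECONDITION & SPEC =====
def Spec_is_unifiable (arguments1 : List String) (arguments2 : List String) (out : Bool × (Option (List (String × String)))) : Prop := out = is_unifiable_alt arguments1 arguments2
instance (arguments1 : List String) (arguments2 : List String) (out : Bool × (Option (List (String × String)))) : Decidable (Spec_is_unifiable arguments1 arguments2 out) := by unfold Spec_is_unifiable; infer_instance

-- ===== CLAIM (what is proved, stated in full; the proofs are below) =====
def Claim_equal_is_unifiable : Prop := ∀ (arguments1 : List String) (arguments2 : List String), Dom_is_unifiable arguments1 arguments2 → Spec_is_unifiable arguments1 arguments2 (is_unifiable arguments1 arguments2)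

-- ===== LEMMAS AND PROOFS =====

-- dict membership 'x in d' is key membership
theorem keys_contains_eq_contains (u : PySem.Dict String String) (k : String) :
    u.keys.contains k = u.contains k := by
  simp [PySem.Dict.contains_eq_decide_mem_keys]

theorem pySubst_tail (u' : PySem.Dict String String) (a : String) (t : List String) :
    (pySubst u' (a :: t)).tail = pySubst u' t := by
  simp [pySubst]

-- A's in-place value-replacement loop, characterised over an arbitrary item list
theorem foldl_insert_items (aV bV : String) :
    ∀ (l : List (String × String)) (d : PySem.Dict String String),
      (∀ kv ∈ l, d.contains kv.1 = true) →
      (l.foldl (fun d kv => if kv.2 == aV then d.insert kv.1 bV else d) d).items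
        = d.items.map (fun p =>
            if ((l.filter (fun kv => kv.2 == aV)).map Prod.fst).contains p.1
            then (p.1, bV) else p) := by
  intro l
  induction l with
  | nil => intro d _; simp
  | cons kv l ih =>
    intro d hc
    by_cases hm : (kv.2 == aV) = true
    · have hck : d.contains kv.1 = true := hc kv (by simp)
      have hc' : ∀ kv' ∈ l, (d.insert kv.1 bV).contains kv'.1 = true := by
        intro kv' h'
        rw [PySem.Dict.contains_insert]
        simp [hc kv' (by simp [h'])]
      have hstep : (List.foldl (fun d kv => if kv.2 == aV then d.insert kv.1 bV else d) d (kv :: l))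
          = List.foldl (fun d kv => if kv.2 == aV then d.insert kv.1 bV else d) (d.insert kv.1 bV) l := by
        rw [List.foldl_cons, if_pos hm]
      rw [hstep, ih _ hc', PySem.Dict.items_insert_of_contains _ _ hck, List.map_map]
      have hfil : List.filter (fun kv => kv.2 == aV) (kv :: l)
          = kv :: List.filter (fun kv => kv.2 == aV) l := by
        simp [hm]
      rw [hfil]
      apply List.map_congr_left
      intro p _
      by_cases hp : (p.1 == kv.1) = true
      · have hpe : p.1 = kv.1 := eq_of_beq hp
        simp [Function.comp, hpe]
      · have hpb : (p.1 == kv.1) = false := by simp_all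
        simp only [Function.comp_apply, List.map_cons, List.contains_cons, hpb,
          Bool.false_or]
        simp
    · have hstep : (List.foldl (fun d kv => if kv.2 == aV then d.insert kv.1 bV else d) d (kv :: l))
          = List.foldl (fun d kv => if kv.2 == aV then d.insert kv.1 bV else d) d l := by
        rw [List.foldl_cons, if_neg hm]
      rw [hstep, ih _ (fun kv' h' => hc kv' (by simp [h'])), List.filter_cons_of_neg (by simp_all)]

-- on a dict with distinct keys, A's replacement loop equals B's comprehension
theorem fold_replace (u : PySem.Dict String String) (hnd : u.keys.Nodup) (aV bV : String) :
    u.items.foldl (fun d kv => if kv.2 == aV then d.insert kv.1 bV else d) u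
      = replaceValsB u aV bV := by
  apply PySem.Dict.ext
  have hc : ∀ kv ∈ u.items, u.contains kv.1 = true := by
    intro kv h
    rw [PySem.Dict.contains_eq_decide_mem_keys]
    simp [PySem.Dict.mem_keys_of_mem_items _ h]
  rw [foldl_insert_items _ _ _ _ hc]
  show _ = u.items.map _
  apply List.map_congr_left
  intro p hp
  by_cases hm : (p.2 == aV) = true
  · have : ((u.items.filter (fun kv => kv.2 == aV)).map Prod.fst).contains p.1 = true := by
      simp only [List.contains_iff_mem, List.mem_map]
      exact ⟨p, List.mem_filter.mpr ⟨hp, hm⟩, rfl⟩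
    rw [this, hm]
  · have : ((u.items.filter (fun kv => kv.2 == aV)).map Prod.fst).contains p.1 = false := by
      rw [Bool.eq_false_iff]
      intro hcon
      rw [List.contains_iff_mem] at hcon
      obtain ⟨q, hq, hqe⟩ := List.mem_map.mp hcon
      have hq' := List.mem_filter.mp hq
      have hqp : q = p := List.inj_on_of_nodup_map hnd hq'.1 hp hqe
      rw [hqp] at hq'
      simp [hm] at hq'
    have hm' : (p.2 == aV) = false := by simpa using hm
    rw [this, hm']

theorem keys_replaceValsB (u : PySem.Dict String String) (aV bV : String) :
    (replaceValsB u aV bV).keys = u.keys := by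
  show (u.items.map _).map Prod.fst = u.items.map Prod.fst
  rw [List.map_map]
  apply List.map_congr_left
  intro p _
  simp only [Function.comp_apply]
  split <;> rfl

-- the children A pushes for one popped state, explored top-first, yield exactly B's recursive call
theorem children_findSome (a b : String) (t1 t2 : List String) (u : PySem.Dict String String)
    (hnd : u.keys.Nodup) :
    (((instsA a b u).map
        (fun u' => ((pySubst u' (a :: t1)).drop 1, (pySubst u' (b :: t2)).drop 1, u'))).reverse).findSome?
        (fun s => tryUnify s.1 s.2.1 s.2.2)
      = tryUnify (a :: t1) (b :: t2) u := by
  rw [tryUnify]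
  unfold instsA
  by_cases hA : pyIslower a = true <;> by_cases hB : pyIslower b = true
  · -- var-var
    simp only [hA, hB, Bool.and_self, ← keys_contains_eq_contains]
    by_cases ca : a ∉ u.keys ∧ a ∉ u.values <;> by_cases cb : b ∉ u.keys ∧ b ∉ u.values <;>
      simp [ca, cb, pySubst_tail, List.findSome?_cons]
    all_goals
      try (cases htry : tryUnify (pySubst (u.insert b a) t1) (pySubst (u.insert b a) t2) (u.insert b a) <;>
            simp)
    all_goals (split <;> simp_all)
  · -- var-const
    have hB' : pyIslower b = false := by simpa using hB
    rw [fold_replace u hnd a b]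
    simp [hA, hB', pySubst_tail, List.findSome?_cons]
    split <;> simp_all
  · -- const-var
    have hA' : pyIslower a = false := by simpa using hA
    rw [fold_replace u hnd b a]
    simp [hA', hB, pySubst_tail, List.findSome?_cons]
    split <;> simp_all
  · -- const-const
    have hA' : pyIslower a = false := by simpa using hA
    have hB' : pyIslower b = false := by simpa using hB
    by_cases hab : (a == b) = true <;>
      simp [hA', hB', hab, pySubst_tail, List.findSome?_cons]
    split <;> simp_all

theorem nodup_keys_instsA (a b : String) (u : PySem.Dict String String) (hnd : u.keys.Nodup) :
    ∀ u' ∈ instsA a b u, u'.keys.Nodup := by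
  intro u' hu'
  unfold instsA at hu'
  split_ifs at hu' <;>
    first
      | (rw [List.mem_singleton] at hu'
         subst hu'
         first
           | exact PySem.Dict.nodup_keys_insert _ _ _ hnd
           | exact hnd
           | exact (fold_replace u hnd a b) ▸
               PySem.Dict.nodup_keys_insert _ _ _ (by rw [keys_replaceValsB]; exact hnd)
           | exact (fold_replace u hnd b a) ▸
               PySem.Dict.nodup_keys_insert _ _ _ (by rw [keys_replaceValsB]; exact hnd))
      | (rcases List.mem_append.mp hu' with h | h <;>
          first
            | (rw [List.mem_singleton] at h
               subst h
               exact PySem.Dict.nodup_keys_insert _ _ _ hnd)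
            | simp at h)
      | simp at hu'

-- the stack loop returns the first successful depth-first branch
theorem loopA_eq : ∀ st : List (List String × List String × PySem.Dict String String),
    (∀ s ∈ st, s.1.length = s.2.1.length ∧ s.2.2.keys.Nodup) →
    loopA st = (match st.findSome? (fun s => tryUnify s.1 s.2.1 s.2.2) with
      | some u => (true, some u.items)
      | none => (false, none)) := by
  intro st
  induction st using loopA.induct with
  | case1 => intro _; simp [loopA, List.findSome?]
  | case2 r1 r2 u rest hg =>
    intro _
    rw [Bool.and_eq_true, List.isEmpty_iff, List.isEmpty_iff] at hg
    obtain ⟨h1, h2⟩ := hg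
    subst h1; subst h2
    rw [loopA.eq_def]
    simp [tryUnify]
  | case3 u rest a t1 b t2 children hg ih =>
    intro hgood
    have hu : u.keys.Nodup := (hgood _ List.mem_cons_self).2
    have hgood' : ∀ s ∈ (List.map
          (fun u' => (List.drop 1 (pySubst u' (a :: t1)), List.drop 1 (pySubst u' (b :: t2)), u'))
          (instsA a b u)).reverse ++ rest,
        s.1.length = s.2.1.length ∧ s.2.2.keys.Nodup := by
      intro s hs
      rcases List.mem_append.mp hs with hs | hs
      · rw [List.mem_reverse] at hs
        obtain ⟨u', hu', rfl⟩ := List.mem_map.mp hs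
        refine ⟨?_, nodup_keys_instsA a b u hu _ hu'⟩
        simpa [pySubst] using (hgood _ List.mem_cons_self).1
      · exact hgood _ (by simp [hs])
    have ihe := ih hgood'
    rw [show children = List.map
        (fun u' => (List.drop 1 (pySubst u' (a :: t1)), List.drop 1 (pySubst u' (b :: t2)), u'))
        (instsA a b u) from rfl] at ihe
    rw [loopA.eq_def]
    simp only [List.isEmpty_cons, Bool.false_and, Bool.false_eq_true, if_false]
    rw [ihe, List.findSome?_append, children_findSome a b t1 t2 u hu, List.findSome?_cons]
    cases h1 : tryUnify (a :: t1) (b :: t2) u <;>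
      cases h2 : List.findSome? (fun s => tryUnify s.1 s.2.1 s.2.2) rest <;>
        simp [h1, h2, Option.orElse]
  | case4 r1 r2 u rest hg hne =>
    intro hgood
    exfalso
    have hlen := (hgood _ List.mem_cons_self).1
    cases r1 with
    | nil =>
      cases r2 with
      | nil => simp at hg
      | cons x xs => simp at hlen
    | cons x xs =>
      cases r2 with
      | nil => simp at hlen
      | cons y ys => exact hne x xs y ys rfl rfl

-- ===== VERDICT (by name: the statement is the Claim_ definition above) =====
theorem is_unifiable_spec : Claim_equal_is_unifiable := by
  intro xs ys _
  unfold Spec_is_unifiable is_unifiable is_unifiable_alt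
  by_cases h : xs.length = ys.length
  · rw [if_neg (by simp [h]), if_neg (by simp [h])]
    rw [loopA_eq [(xs, ys, PySem.Dict.empty)]
      (by intro s hs; simp at hs; subst hs; exact ⟨h, PySem.Dict.nodup_keys_empty⟩)]
    rw [List.findSome?_cons]
    cases tryUnify xs ys PySem.Dict.empty <;> simp [List.findSome?]
  · rw [if_pos (by simp [h]), if_pos (by simp [h])]
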